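-- pv_equiv track=rewrite | github.com/CunyangWei/FlashSparse | devide.py | get_block_indices
-- ===== SOURCE A (Python) =====
-- def get_block_indices(total, num_blocks):
--     """
--     根据总数和块数计算每块的起始和结束索引，
--     如果不能整除，则前面块多分配1个单位。
--     """
--     block_size = total // num_blocks
--     remainder = total % num_blocks
--     indices = []
--     start = 0
--     for i in range(num_blocks):
--         extra = 1 if i < remainder else 0
--         end = start + block_size + extra
--         indices.append((start, end))
--         start = end
--     return indices
-- ===== SOURCE B (Python) =====
-- def get_block_indices(total, num_blocks):
--     """Closed-form partition: each boundary computed directly from i, no running state."""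
--     block_size = total // num_blocks
--     remainder = total % num_blocks
--     return [(i * block_size + min(i, remainder),
--              (i + 1) * block_size + min(i + 1, remainder))
--             for i in range(num_blocks)]
-- ===== Notes on version B (the rewrite author's own statement) =====
-- stated objective: simpler
-- what changed: Replaced the sequential loop carrying a running start accumulator with a single comprehension computing each (start, end) pair independently by the closed form i*block_size + min(i, remainder).
import Mathlib
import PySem

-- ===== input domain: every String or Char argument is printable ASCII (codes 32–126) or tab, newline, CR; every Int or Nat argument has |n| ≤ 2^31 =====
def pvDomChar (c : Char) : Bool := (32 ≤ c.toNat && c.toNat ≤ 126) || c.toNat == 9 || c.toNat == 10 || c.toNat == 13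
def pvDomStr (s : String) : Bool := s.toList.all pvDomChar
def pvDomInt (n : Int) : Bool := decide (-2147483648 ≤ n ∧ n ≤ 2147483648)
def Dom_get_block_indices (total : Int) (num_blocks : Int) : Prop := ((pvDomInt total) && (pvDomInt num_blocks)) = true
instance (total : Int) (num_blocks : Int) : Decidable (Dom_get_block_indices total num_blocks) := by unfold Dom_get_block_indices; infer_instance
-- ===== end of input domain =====

-- B replaces A's running start accumulator with an independent closed form per index; objective: simpler.

-- ===== PORT A =====
def get_block_indices (total : Int) (num_blocks : Int) : List (Int × Int) :=
  let block_size := PySem.Int.floordiv total num_blocks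
  let remainder := PySem.Int.mod total num_blocks
  let st := (PySem.List.pyRange 0 num_blocks 1).foldl
    (fun (st : List (Int × Int) × Int) i =>
      let extra : Int := if i < remainder then 1 else 0
      let e := st.2 + block_size + extra
      (st.1 ++ [(st.2, e)], e)) ([], 0)
  st.1

-- ===== PORT B =====
def get_block_indices_alt (total : Int) (num_blocks : Int) : List (Int × Int) :=
  let block_size := PySem.Int.floordiv total num_blocks
  let remainder := PySem.Int.mod total num_blocks
  (PySem.List.pyRange 0 num_blocks 1).map
    (fun i => (i * block_size + min i remainder,
               (i + 1) * block_size + min (i + 1) remainder))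

-- ===== PRECONDITION & SPEC =====
-- A raises ZeroDivisionError when num_blocks == 0; Pre_ excludes exactly that.
def Pre_get_block_indices (total : Int) (num_blocks : Int) : Prop := num_blocks ≠ 0
instance (total : Int) (num_blocks : Int) : Decidable (Pre_get_block_indices total num_blocks) := by unfold Pre_get_block_indices; infer_instance
def pvWitness_get_block_indices : Int × Int := (10, 3)
def Spec_get_block_indices (total : Int) (num_blocks : Int) (out : List (Int × Int)) : Prop := out = get_block_indices_alt total num_blocks
instance (total : Int) (num_blocks : Int) (out : List (Int × Int)) : Decidable (Spec_get_block_indices total num_blocks out) := by unfold Spec_get_block_indices; infer_instance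

-- ===== CLAIM (what is proved, stated in full; the proofs are below) =====
def Claim_equal_get_block_indices : Prop := ∀ (total : Int) (num_blocks : Int), Dom_get_block_indices total num_blocks → Pre_get_block_indices total num_blocks → Spec_get_block_indices total num_blocks (get_block_indices total num_blocks)

-- ===== LEMMAS AND PROOFS =====

lemma gbi_step (bs r a : Int) :
    a * bs + min a r + bs + (if a < r then (1:Int) else 0) = (a + 1) * bs + min (a + 1) r := by
  rcases lt_or_ge a r with h | h
  · rw [if_pos h, min_eq_left h.le, min_eq_left (by omega)]; ring
  · rw [if_neg (not_lt.mpr h), min_eq_right h, min_eq_right (by omega)]; ring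

lemma gbi_fold (bs r : Int) : ∀ (n : Nat) (a : Int) (acc : List (Int × Int)),
    (PySem.List.pyRange a (a + n) 1).foldl
      (fun (st : List (Int × Int) × Int) i =>
        let extra : Int := if i < r then 1 else 0
        let e := st.2 + bs + extra
        (st.1 ++ [(st.2, e)], e)) (acc, a * bs + min a r)
    = (acc ++ (PySem.List.pyRange a (a + n) 1).map
        (fun i => (i * bs + min i r, (i + 1) * bs + min (i + 1) r)),
       (a + n) * bs + min (a + n) r) := by
  intro n
  induction n with
  | zero => intro a acc; simp [PySem.List.pyRange_one_eq_nil (by omega : (a:Int) + 0 ≤ a)]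
  | succ n ih =>
    intro a acc
    rw [PySem.List.pyRange_one_cons (by omega : a < a + (n + 1 : Nat))]
    simp only [List.foldl_cons, List.map_cons]
    have hb : a + ((n : Nat) + 1 : Nat) = (a + 1) + (n : Nat) := by push_cast; ring
    rw [hb]
    have := ih (a + 1) (acc ++ [(a * bs + min a r, a * bs + min a r + bs + (if a < r then (1:Int) else 0))])
    simp only [gbi_step] at this ⊢
    rw [this]
    simp

theorem get_block_indices_spec : Claim_equal_get_block_indices := by
  intro total num_blocks _ hpre
  unfold Spec_get_block_indices get_block_indices get_block_indices_alt
  rcases lt_or_gt_of_ne hpre with h | h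
  · rw [PySem.List.pyRange_one_eq_nil (by omega)]; simp
  · have hr : 0 ≤ PySem.Int.mod total num_blocks := by
      rw [PySem.Int.mod_eq_emod_of_pos h]; exact Int.emod_nonneg total (by omega)
    have key := gbi_fold (PySem.Int.floordiv total num_blocks) (PySem.Int.mod total num_blocks) num_blocks.toNat 0 []
    simp only [zero_mul, zero_add, min_eq_left hr, Int.toNat_of_nonneg h.le] at key
    dsimp only
    rw [key]
    simp
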